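-- pv_equiv track=rewrite | github.com/987123879113/gobbletools | sys573/sys573tool/dump_sys573_gamefs.py | decrypt_data_internal
-- ===== SOURCE A (Python) =====
-- def decrypt_data_internal(data, key):
--     def calculate_crc32(input):
--         crc = -1
--
--         for c in bytearray(input, encoding='ascii'):
--             crc ^= c << 24
--
--             for _ in range(8):
--                 if crc & 0x80000000:
--                     crc = (crc << 1) ^ 0x4C11DB7
--                 else:
--                     crc <<= 1
--
--         return crc
--
--
--     decryption_key = calculate_crc32(key)
--
--     for i in range(len(data)):
--         data[i] ^= (decryption_key >> 8) & 0xff # This 8 can be variable it seems, but it usually is 8?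
--
--     return data
-- ===== SOURCE B (Python) =====
-- # Table-driven CRC32 (MSB-first, poly 0x04C11DB7, no reflection): build a 256-entry
-- # table once, then one lookup per key byte instead of 8 bit-serial rounds; the XOR
-- # of the derived key byte into the data is done with a list rewrite.
-- # Note: A mutates `data` in place; B does the same (writes data[i] back).
-- def decrypt_data_internal(data, key):
--     table = []
--     for b in range(256):
--         r = b << 24
--         for _ in range(8):
--             if r & 0x80000000:
--                 r = ((r << 1) ^ 0x4C11DB7) & 0xFFFFFFFF
--             else:
--                 r = (r << 1) & 0xFFFFFFFF
--         table.append(r)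
--
--     crc = 0xFFFFFFFF
--     for c in bytearray(key, encoding='ascii'):
--         crc = ((crc << 8) ^ table[((crc >> 24) ^ c) & 0xFF]) & 0xFFFFFFFF
--
--     kb = (crc >> 8) & 0xff
--     for i in range(len(data)):
--         data[i] ^= kb
--     return data
-- ===== Notes on version B (the rewrite author's own statement) =====
-- stated objective: faster
-- what changed: The bit-serial CRC32 (8 shift/XOR rounds per key byte on an unmasked, ever-growing Python int) is replaced by a table-driven CRC32: a 256-entry table of precomputed 8-round reductions, one shift+lookup+XOR per key byte on values masked to 32 bits; the derived key byte and the XOR over the data are unchanged.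
import Mathlib
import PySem

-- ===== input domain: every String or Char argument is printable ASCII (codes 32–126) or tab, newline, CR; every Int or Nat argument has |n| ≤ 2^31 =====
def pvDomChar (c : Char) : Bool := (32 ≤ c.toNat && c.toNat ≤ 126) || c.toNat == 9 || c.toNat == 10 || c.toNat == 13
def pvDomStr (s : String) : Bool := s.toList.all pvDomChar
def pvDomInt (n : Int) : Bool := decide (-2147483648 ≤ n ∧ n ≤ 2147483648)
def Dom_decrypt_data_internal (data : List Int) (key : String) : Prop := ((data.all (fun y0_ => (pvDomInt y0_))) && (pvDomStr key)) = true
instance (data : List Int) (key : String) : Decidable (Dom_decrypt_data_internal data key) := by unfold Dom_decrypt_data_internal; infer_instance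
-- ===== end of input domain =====

-- B replaces A's bit-serial CRC32 (8 shift/XOR rounds per key byte, on an unmasked
-- Python int) by a 256-entry table-driven CRC32 over masked 32-bit values; the XOR of
-- the derived key byte into the data is unchanged. A mutates `data` in place and
-- returns it; the equivalence proved here is about the return value (B's Python does
-- the same in-place update).

-- ===== PORT A =====
-- inner helper `calculate_crc32`: crc is a plain Python int (it stays negative),
-- `&` and `^` are PySem.Int.band/bxor, `<<`/`>>` are core Int shifts (Python-exact).
def pvRoundA (crc : Int) : Int :=
  if PySem.Int.band crc 0x80000000 ≠ 0 then PySem.Int.bxor (crc <<< (1:Nat)) 0x4C11DB7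
  else crc <<< (1:Nat)

-- one iteration of A's outer loop: `crc ^= c << 24` then the 8-round inner loop
def pvByteA (crc : Int) (c : Nat) : Int :=
  (List.range 8).foldl (fun crc _ => pvRoundA crc) (PySem.Int.bxor crc ((c:Int) <<< (24:Nat)))

def pvCalcCrc32 (input : String) : Int :=
  input.toList.foldl (fun crc c => pvByteA crc c.toNat) (-1)

def decrypt_data_internal (data : List Int) (key : String) : List Int :=
  let dk := pvCalcCrc32 key
  data.map (fun d => PySem.Int.bxor d (PySem.Int.band (dk >>> (8:Nat)) 0xff))

-- ===== PORT B =====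
-- every intermediate in Source B is a nonnegative int masked to 32 bits, so the CRC part
-- is ported over Nat (Nat's <<< >>> ^^^ &&& agree with Python on nonnegative ints).
def pvRoundB (r : Nat) : Nat :=
  if r &&& 0x80000000 ≠ 0 then ((r <<< 1) ^^^ 0x4C11DB7) &&& 0xFFFFFFFF
  else (r <<< 1) &&& 0xFFFFFFFF

-- the 256-entry table: 8 masked shift/XOR rounds on b << 24
def pvTable : List Nat :=
  (List.range 256).map (fun b => (List.range 8).foldl (fun r _ => pvRoundB r) (b <<< 24))

-- one table-driven step: crc = ((crc << 8) ^ table[((crc >> 24) ^ c) & 0xFF]) & 0xFFFFFFFF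
def pvStepB (crc c : Nat) : Nat :=
  ((crc <<< 8) ^^^ pvTable.getD (((crc >>> 24) ^^^ c) &&& 0xFF) 0) &&& 0xFFFFFFFF

def decrypt_data_internal_alt (data : List Int) (key : String) : List Int :=
  let crc := key.toList.foldl (fun crc c => pvStepB crc c.toNat) 0xFFFFFFFF
  let kb := (crc >>> 8) &&& 0xFF
  data.map (fun d => PySem.Int.bxor d (kb : Int))

-- ===== PRECONDITION & SPEC =====
def Spec_decrypt_data_internal (data : List Int) (key : String) (out : List Int) : Prop := out = decrypt_data_internal_alt data key
instance (data : List Int) (key : String) (out : List Int) : Decidable (Spec_decrypt_data_internal data key out) := by unfold Spec_decrypt_data_internal; infer_instance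

-- ===== CLAIM (what is proved, stated in full; the proofs are below) =====
def Claim_equal_decrypt_data_internal : Prop := ∀ (data : List Int) (key : String), Dom_decrypt_data_internal data key → Spec_decrypt_data_internal data key (decrypt_data_internal data key)

-- ===== LEMMAS AND PROOFS =====

-- Nat mirror of A's round: A's crc is always `Int.negSucc m`; `m` is its bitwise complement.
def pvRoundA' (m : Nat) : Nat :=
  if m.testBit 31 then 2*m+1 else (2*m+1) ^^^ 0x4C11DB7

def pvByteA' (m c : Nat) : Nat :=
  (List.range 8).foldl (fun m _ => pvRoundA' m) (m ^^^ (c <<< 24))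

-- `n` (B's masked crc) agrees with the complement of `m` (A's mirror) on the low 32 bits
def pvCmp32 (m n : Nat) : Prop := n < 2^32 ∧ ∀ i, i < 32 → n.testBit i = !m.testBit i

lemma tb_M (i : Nat) : (0xFFFFFFFF:Nat).testBit i = decide (i < 32) := by
  rw [show (0xFFFFFFFF:Nat) = 2^32 - 1 from by norm_num, Nat.testBit_two_pow_sub_one]

lemma tb_FF (i : Nat) : (0xFF:Nat).testBit i = decide (i < 8) := by
  rw [show (0xFF:Nat) = 2^8 - 1 from by norm_num, Nat.testBit_two_pow_sub_one]

lemma tb_L24 (i : Nat) : (0xFFFFFF:Nat).testBit i = decide (i < 24) := by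
  rw [show (0xFFFFFF:Nat) = 2^24 - 1 from by norm_num, Nat.testBit_two_pow_sub_one]

lemma tb_mul2add1 (m i : Nat) :
    (2*m+1).testBit i = (decide (i = 0) || (decide (0 < i) && m.testBit (i-1))) := by
  rcases i with _ | j
  · simp
  · simp [Nat.testBit_add_one]
    have h : (2*m+1)/2 = m := by omega
    simp [h]

lemma and_M_of_lt {x : Nat} (h : x < 2^32) : x &&& 0xFFFFFFFF = x := by
  rw [show (0xFFFFFFFF:Nat) = 2^32 - 1 from by norm_num,
    Nat.and_two_pow_sub_one_eq_mod, Nat.mod_eq_of_lt h]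

lemma and_M_lt (x : Nat) : x &&& 0xFFFFFFFF < 2^32 :=
  lt_of_le_of_lt Nat.and_le_right (by norm_num)

lemma roundB_lt (r : Nat) : pvRoundB r < 2^32 := by
  unfold pvRoundB; split <;> exact and_M_lt _

lemma and_H (n : Nat) : (n &&& 0x80000000 ≠ 0) ↔ n.testBit 31 = true := by
  rw [show (0x80000000:Nat) = 2^31 from by norm_num, Nat.and_two_pow]
  cases h : n.testBit 31 <;> simp

lemma roundB_eq (r : Nat) :
    pvRoundB r = ((r <<< 1) ^^^ (if r.testBit 31 then 0x4C11DB7 else 0)) &&& 0xFFFFFFFF := by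
  unfold pvRoundB
  by_cases h : r.testBit 31
  · rw [if_pos ((and_H r).2 h), if_pos h]
  · rw [if_neg (fun hc => h ((and_H r).1 hc)), if_neg h]
    simp

lemma round_cmp {m n : Nat} (h : pvCmp32 m n) : pvCmp32 (pvRoundA' m) (pvRoundB n) := by
  obtain ⟨hn, hb⟩ := h
  refine ⟨roundB_lt n, ?_⟩
  intro i hi
  have h31 := hb 31 (by omega)
  rw [roundB_eq]
  unfold pvRoundA'
  by_cases hm : m.testBit 31
  · rw [if_pos hm]
    rw [hm] at h31
    rw [if_neg (by simp [h31])]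
    simp [Nat.testBit_and, Nat.testBit_shiftLeft, tb_M, tb_mul2add1, hi]
    by_cases h0 : i = 0
    · simp [h0]
    · simp [h0, show 1 ≤ i by omega, show 0 < i by omega, hb (i-1) (by omega)]
  · rw [if_neg hm]
    rw [Bool.not_eq_true] at hm
    rw [hm] at h31
    rw [if_pos (by simp [h31])]
    simp [Nat.testBit_and, Nat.testBit_xor, Nat.testBit_shiftLeft, tb_M, tb_mul2add1, hi]
    by_cases h0 : i = 0
    · subst h0; simp
    · simp [h0, show 1 ≤ i by omega, show 0 < i by omega, hb (i-1) (by omega)]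

lemma xorstep_cmp {m n : Nat} (h : pvCmp32 m n) (c : Nat) :
    pvCmp32 (m ^^^ (c <<< 24)) ((n ^^^ (c <<< 24)) &&& 0xFFFFFFFF) := by
  obtain ⟨hn, hb⟩ := h
  refine ⟨and_M_lt _, ?_⟩
  intro i hi
  simp [Nat.testBit_and, Nat.testBit_xor, tb_M, hi, hb i hi]

lemma foldl_const {α β : Type} (f : β → β) :
    ∀ (l : List α) (x : β), l.foldl (fun a _ => f a) x = f^[l.length] x := by
  intro l
  induction l with
  | nil => intro x; rfl
  | cons a l ih => intro x; simp [List.foldl_cons, ih, Function.iterate_succ_apply]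

lemma iter_cmp {m n : Nat} (h : pvCmp32 m n) (k : Nat) :
    pvCmp32 (pvRoundA'^[k] m) (pvRoundB^[k] n) := by
  induction k generalizing m n with
  | zero => exact h
  | succ k ih =>
    rw [Function.iterate_succ_apply, Function.iterate_succ_apply]
    exact ih (round_cmp h)

lemma roundB_xor (a b : Nat) : pvRoundB (a ^^^ b) = pvRoundB a ^^^ pvRoundB b := by
  rw [roundB_eq, roundB_eq, roundB_eq]
  apply Nat.eq_of_testBit_eq
  intro i
  cases ha : a.testBit 31 <;> cases hb : b.testBit 31 <;>
    simp [Nat.testBit_and, Nat.testBit_xor, Nat.testBit_shiftLeft, tb_M, ha, hb] <;>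
    by_cases hi : i < 32 <;>
    by_cases h1 : 1 ≤ i <;>
    simp [hi, h1] <;>
    cases h2 : a.testBit (i-1) <;> cases h3 : b.testBit (i-1) <;>
    cases h4 : (0x4C11DB7:Nat).testBit i <;> simp

lemma iterB_xor (k a b : Nat) :
    pvRoundB^[k] (a ^^^ b) = pvRoundB^[k] a ^^^ pvRoundB^[k] b := by
  induction k generalizing a b with
  | zero => rfl
  | succ k ih =>
    rw [Function.iterate_succ_apply, Function.iterate_succ_apply,
      Function.iterate_succ_apply, roundB_xor, ih]

lemma iterB_lt (k x : Nat) : pvRoundB^[k+1] x < 2^32 := by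
  rw [Function.iterate_succ_apply']; exact roundB_lt _

lemma roundB_small {x : Nat} (h : x < 2^31) : pvRoundB x = x <<< 1 := by
  rw [roundB_eq, if_neg, Nat.xor_zero, and_M_of_lt]
  · rw [Nat.shiftLeft_eq]; omega
  · simp [Nat.testBit_lt_two_pow h]

lemma iterB_small : ∀ k, k ≤ 8 → ∀ x, x < 2^24 → pvRoundB^[k] x = x <<< k := by
  intro k
  induction k with
  | zero => intro _ x _; simp
  | succ k ih =>
    intro hk x hx
    rw [Function.iterate_succ_apply', ih (by omega) x hx, roundB_small, ← Nat.shiftLeft_add]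
    rw [Nat.shiftLeft_eq]
    calc x * 2^k < 2^24 * 2^k := by
          have := Nat.two_pow_pos k; nlinarith
      _ ≤ 2^31 := by rw [← pow_add]; exact Nat.pow_le_pow_right (by norm_num) (by omega)

lemma split32 (x : Nat) : x = (x &&& 0xFFFFFF) ^^^ ((x >>> 24) <<< 24) := by
  apply Nat.eq_of_testBit_eq
  intro i
  simp [Nat.testBit_and, Nat.testBit_xor, Nat.testBit_shiftLeft, Nat.testBit_shiftRight, tb_L24]
  by_cases hi : i < 24
  · simp [hi, show ¬ (24 ≤ i) by omega]
  · simp [hi, show 24 ≤ i by omega, show 24 + (i-24) = i by omega]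

lemma table_getD {t : Nat} (ht : t < 256) :
    pvTable.getD t 0 = pvRoundB^[8] (t <<< 24) := by
  unfold pvTable
  rw [List.getD_eq_getElem?_getD, List.getElem?_map, List.getElem?_range ht]
  simp [foldl_const]

lemma maskFF_lt (x : Nat) : x &&& 0xFF < 256 :=
  lt_of_le_of_lt Nat.and_le_right (by norm_num)

lemma shift8_mask (n : Nat) : (n <<< 8) &&& 0xFFFFFFFF = (n &&& 0xFFFFFF) <<< 8 := by
  apply Nat.eq_of_testBit_eq
  intro i
  simp [Nat.testBit_and, Nat.testBit_shiftLeft, tb_M, tb_L24]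
  by_cases h8 : 8 ≤ i
  · by_cases hi : i < 32 <;> simp [h8, hi, show (i - 8 < 24) ↔ (i < 32) by omega]
  · simp [h8]

lemma stepB_iter (n c : Nat) :
    pvStepB n c = pvRoundB^[8] ((n ^^^ (c <<< 24)) &&& 0xFFFFFFFF) := by
  have h1 : ((n ^^^ (c <<< 24)) &&& 0xFFFFFFFF) &&& 0xFFFFFF = n &&& 0xFFFFFF := by
    apply Nat.eq_of_testBit_eq
    intro i
    simp [Nat.testBit_and, Nat.testBit_xor, tb_M, tb_L24, Nat.testBit_shiftLeft]
    by_cases hi : i < 24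
    · simp [hi, show i < 32 by omega, show ¬ (24 ≤ i) by omega]
    · simp [hi]
  have h2 : ((n ^^^ (c <<< 24)) &&& 0xFFFFFFFF) >>> 24 = ((n >>> 24) ^^^ c) &&& 0xFF := by
    apply Nat.eq_of_testBit_eq
    intro i
    simp [Nat.testBit_and, Nat.testBit_xor, tb_M, tb_FF, Nat.testBit_shiftLeft,
      Nat.testBit_shiftRight]
    by_cases hi : i < 8
    · simp [hi, show 24 + i < 32 by omega]
    · simp [hi, show ¬ (24 + i < 32) by omega]
  have hlo : ((n ^^^ (c <<< 24)) &&& 0xFFFFFFFF) &&& 0xFFFFFF < 2^24 := by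
    rw [h1]; exact lt_of_le_of_lt Nat.and_le_right (by norm_num)
  have hflt : pvRoundB^[8] ((((n >>> 24) ^^^ c) &&& 0xFF) <<< 24) < 2^32 := iterB_lt 7 _
  unfold pvStepB
  rw [table_getD (maskFF_lt _)]
  rw [show ((n <<< 8) ^^^ pvRoundB^[8] ((((n >>> 24) ^^^ c) &&& 0xFF) <<< 24)) &&& 0xFFFFFFFF
      = ((n <<< 8) &&& 0xFFFFFFFF) ^^^ (pvRoundB^[8] ((((n >>> 24) ^^^ c) &&& 0xFF) <<< 24) &&& 0xFFFFFFFF)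
    from Nat.and_xor_distrib_right]
  rw [shift8_mask, and_M_of_lt hflt]
  conv_rhs => rw [split32 ((n ^^^ (c <<< 24)) &&& 0xFFFFFFFF)]
  rw [iterB_xor, iterB_small 8 le_rfl _ hlo, h1, h2]

lemma byte_cmp {m n : Nat} (h : pvCmp32 m n) (c : Nat) :
    pvCmp32 (pvByteA' m c) (pvStepB n c) := by
  rw [stepB_iter]
  unfold pvByteA'
  rw [foldl_const, List.length_range]
  exact iter_cmp (xorstep_cmp h c) 8

lemma init_cmp : pvCmp32 0 0xFFFFFFFF := by
  refine ⟨by norm_num, ?_⟩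
  intro i hi
  simp [tb_M, hi]

lemma fold_cmp : ∀ (cs : List Char) (m n : Nat), pvCmp32 m n →
    pvCmp32 (cs.foldl (fun m c => pvByteA' m c.toNat) m)
      (cs.foldl (fun n c => pvStepB n c.toNat) n) := by
  intro cs
  induction cs with
  | nil => intro m n h; exact h
  | cons c cs ih => intro m n h; exact ih _ _ (byte_cmp h c.toNat)

set_option maxRecDepth 4096 in
lemma sub_and_FF : ∀ u, u < 256 → 255 - u = 255 ^^^ u := by decide

lemma keybyte_eq {m n : Nat} (h : pvCmp32 m n) :
    255 - (255 &&& (m >>> 8)) = (n >>> 8) &&& 0xFF := by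
  obtain ⟨hn, hb⟩ := h
  rw [sub_and_FF _ (lt_of_le_of_lt Nat.and_le_left (by norm_num))]
  apply Nat.eq_of_testBit_eq
  intro i
  simp [Nat.testBit_and, Nat.testBit_xor, Nat.testBit_shiftRight, tb_FF]
  by_cases hi : i < 8
  · simp [hi, hb (8+i) (by omega)]
  · simp [hi]

-- Int ↔ Nat-complement bridge
lemma bxor_negSucc (m k : Nat) :
    PySem.Int.bxor (Int.negSucc m) (k:Int) = Int.negSucc (m ^^^ k) := by
  simp [PySem.Int.bxor, Int.negSucc_eq]; omega

lemma band_negSucc (m k : Nat) :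
    PySem.Int.band (Int.negSucc m) (k:Int) = ((k - (k &&& m) : Nat) : Int) := by
  simp [PySem.Int.band, Int.negSucc_eq]; omega

lemma shl1_negSucc (m : Nat) : (Int.negSucc m) <<< (1:Nat) = Int.negSucc (2*m+1) := by
  simp [Int.negSucc_eq, Int.shiftLeft_eq]; ring

lemma shr8_negSucc (m : Nat) : (Int.negSucc m) >>> (8:Nat) = Int.negSucc (m >>> 8) := rfl

lemma natCast_shl24 (c : Nat) : (c:Int) <<< (24:Nat) = ((c <<< 24 : Nat) : Int) := by
  rw [Int.shiftLeft_eq, Nat.shiftLeft_eq]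
  push_cast
  ring

lemma roundA_negSucc (m : Nat) : pvRoundA (Int.negSucc m) = Int.negSucc (pvRoundA' m) := by
  unfold pvRoundA pvRoundA'
  rw [show (0x80000000:Int) = ((0x80000000:Nat):Int) from by norm_cast, band_negSucc]
  have hcomm : (0x80000000:Nat) &&& m = (m.testBit 31).toNat * 2^31 := by
    rw [Nat.and_comm, show (0x80000000:Nat) = 2^31 from by norm_num, Nat.and_two_pow]
  by_cases hm : m.testBit 31
  · rw [if_neg (by simp [hcomm, hm]), if_pos hm, shl1_negSucc]
  · rw [Bool.not_eq_true] at hm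
    rw [if_pos (by simp [hcomm, hm]), if_neg (by simp [hm]), shl1_negSucc,
      show (0x4C11DB7:Int) = ((0x4C11DB7:Nat):Int) from by norm_cast, bxor_negSucc]

lemma iterA_negSucc (k : Nat) : ∀ m : Nat,
    pvRoundA^[k] (Int.negSucc m) = Int.negSucc (pvRoundA'^[k] m) := by
  induction k with
  | zero => intro m; rfl
  | succ k ih =>
    intro m
    rw [Function.iterate_succ_apply, Function.iterate_succ_apply, roundA_negSucc, ih]

lemma byteA_negSucc (m c : Nat) : pvByteA (Int.negSucc m) c = Int.negSucc (pvByteA' m c) := by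
  unfold pvByteA pvByteA'
  rw [natCast_shl24, bxor_negSucc, foldl_const, foldl_const, List.length_range,
    iterA_negSucc]

lemma foldA_negSucc : ∀ (cs : List Char) (m : Nat),
    cs.foldl (fun crc c => pvByteA crc c.toNat) (Int.negSucc m)
      = Int.negSucc (cs.foldl (fun m c => pvByteA' m c.toNat) m) := by
  intro cs
  induction cs with
  | nil => intro m; rfl
  | cons c cs ih => intro m; rw [List.foldl_cons, List.foldl_cons, byteA_negSucc, ih]

lemma calc_negSucc (key : String) :
    pvCalcCrc32 key = Int.negSucc (key.toList.foldl (fun m c => pvByteA' m c.toNat) 0) := by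
  unfold pvCalcCrc32
  rw [show (-1 : Int) = Int.negSucc 0 from rfl]
  exact foldA_negSucc _ 0

-- ===== VERDICT (by name: the statement is the Claim_ definition above) =====
theorem decrypt_data_internal_spec : Claim_equal_decrypt_data_internal := by
  intro data key _
  unfold Spec_decrypt_data_internal
  have hcmp := fold_cmp key.toList 0 0xFFFFFFFF init_cmp
  simp only [decrypt_data_internal, decrypt_data_internal_alt]
  rw [calc_negSucc, shr8_negSucc,
    show (0xff:Int) = ((0xff:Nat):Int) from by norm_cast, band_negSucc,
    keybyte_eq hcmp]
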